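-- pv_equiv track=rewrite | github.com/getintogit1/C-Cpp | Python/main.py | berechne_kosten
-- ===== SOURCE A (Python) =====
-- def berechne_kosten(name, stueckliste, preise, cache=None):
--     if cache is None:
--         cache = {}
--
--     # Falls schon berechnet → direkt zurückgeben
--     if name in cache:
--         return cache[name]
--
--     # Fall 1: Basis-Teil (kein Eintrag in stueckliste)
--     if name not in stueckliste:
--         kosten = preise[name]
--         cache[name] = kosten
--         return kosten
--
--     # Fall 2: Endprodukt → rekursiv berechnen
--     gesamt = 0
--     for teil, menge in stueckliste[name].items():
--         teil_kosten = berechne_kosten(teil, stueckliste, preise, cache)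
--         gesamt += teil_kosten * menge
--
--     cache[name] = gesamt
--     return gesamt
-- ===== SOURCE B (Python) =====
-- def berechne_kosten(name, stueckliste, preise, cache=None):
--     # Dataflow/fixpoint evaluation instead of top-down recursion: repeatedly
--     # sweep the parts list, computing every entry whose components are already
--     # available, then answer name with one lookup.
--     # Note: unlike the original, this does not mutate the caller's cache dict.
--     table = {} if cache is None else dict(cache)
--     for _ in range(len(stueckliste)):
--         for teil, komponenten in stueckliste.items():
--             if teil not in table and all(
--                 c in table or (c not in stueckliste and c in preise)
--                 for c in komponenten
--             ):
--                 table[teil] = sum(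
--                     (table[c] if c in table else preise[c]) * menge
--                     for c, menge in komponenten.items()
--                 )
--     return table[name] if name in table else preise[name]
-- ===== Notes on version B (the rewrite author's own statement) =====
-- stated objective: alternative
-- what changed: Replaces A's top-down memoized recursion (shared mutable cache threaded through recursive calls) by a dataflow fixpoint: repeated bottom-up sweeps over the parts list that compute every entry whose components are already available, then one lookup; B matches A's value on every input A returns and does not mutate the caller's cache dict.
import Mathlib
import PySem

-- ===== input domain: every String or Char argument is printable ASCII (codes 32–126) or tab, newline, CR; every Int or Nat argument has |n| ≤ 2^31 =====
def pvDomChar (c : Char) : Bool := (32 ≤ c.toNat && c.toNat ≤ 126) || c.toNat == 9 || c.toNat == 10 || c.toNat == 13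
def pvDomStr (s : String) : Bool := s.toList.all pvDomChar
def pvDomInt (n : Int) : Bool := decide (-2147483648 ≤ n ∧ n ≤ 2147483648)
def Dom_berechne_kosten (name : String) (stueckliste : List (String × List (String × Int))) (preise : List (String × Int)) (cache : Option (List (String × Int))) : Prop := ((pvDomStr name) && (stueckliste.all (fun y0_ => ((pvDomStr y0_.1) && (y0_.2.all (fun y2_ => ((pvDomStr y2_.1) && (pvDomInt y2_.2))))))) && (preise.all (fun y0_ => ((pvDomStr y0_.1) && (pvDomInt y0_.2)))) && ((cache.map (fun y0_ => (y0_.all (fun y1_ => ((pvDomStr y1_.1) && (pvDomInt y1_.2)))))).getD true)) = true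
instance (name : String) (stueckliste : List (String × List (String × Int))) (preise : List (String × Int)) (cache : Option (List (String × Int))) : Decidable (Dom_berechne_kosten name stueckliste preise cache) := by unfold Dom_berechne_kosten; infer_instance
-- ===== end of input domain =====

-- B replaces A's top-down memoized recursion by repeated bottom-up sweeps to a fixpoint; equivalence
-- is about the RETURN value only (A mutates the passed-in cache dict, B does not).

-- ===== PORT A =====
-- 'cache = {} if cache is None' (shared by both ports and Pre_): the starting dict
def pvCache (cache : Option (List (String × Int))) : PySem.Dict String Int :=
  match cache with
  | none => PySem.Dict.empty
  | some l => PySem.Dict.ofList l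

-- Python's recursion made total with a fuel counter (S.size + 1 strictly bounds the recursion
-- depth on every input admitted by Pre_); the fuel-0 branch is never reached under Pre_.
-- preise[x] / its KeyError is P.getD x 0, exact because Pre_ excludes the KeyError inputs.
def pvGoA (S : PySem.Dict String (List (String × Int))) (P : PySem.Dict String Int) :
    Nat → String → PySem.Dict String Int → Int × PySem.Dict String Int
  | 0, _, c => (0, c)
  | Nat.succ fuel, name, c =>
    match c.get? name with
    | some v => (v, c)                             -- if name in cache: return cache[name]
    | none =>
      match S.get? name with
      | none =>                                    -- if name not in stueckliste
        let kosten := P.getD name 0                --   kosten = preise[name]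
        (kosten, c.insert name kosten)             --   cache[name] = kosten; return kosten
      | some comp =>                               -- else: for teil, menge in stueckliste[name].items()
        let r := (PySem.Dict.ofList comp).items.foldl
          (fun (acc : Int × PySem.Dict String Int) q =>
            let t := pvGoA S P fuel q.1 acc.2
            (acc.1 + t.1 * q.2, t.2)) (0, c)
        (r.1, r.2.insert name r.1)                 -- cache[name] = gesamt; return gesamt

def berechne_kosten (name : String) (stueckliste : List (String × List (String × Int))) (preise : List (String × Int)) (cache : Option (List (String × Int))) : Int :=
  let S := PySem.Dict.ofList stueckliste
  let P := PySem.Dict.ofList preise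
  (pvGoA S P (S.size + 1) name (pvCache cache)).1

-- ===== PORT B =====
-- one item of a sweep: 'if teil not in table and all(c in table or (c not in stueckliste and c in preise)
-- for c in komponenten): table[teil] = sum((table[c] if c in table else preise[c]) * menge …)'
def pvStepB (S : PySem.Dict String (List (String × Int))) (P : PySem.Dict String Int)
    (t : PySem.Dict String Int) (p : String × List (String × Int)) : PySem.Dict String Int :=
  if !t.contains p.1 && (PySem.Dict.ofList p.2).keys.all
      (fun c => t.contains c || (!(S.contains c) && P.contains c)) then
    t.insert p.1 (((PySem.Dict.ofList p.2).items.map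
      (fun q => (match t.get? q.1 with | some v => v | none => P.getD q.1 0) * q.2)).sum)
  else t

-- 'for teil, komponenten in stueckliste.items(): …' (one sweep)
def pvPass (S : PySem.Dict String (List (String × Int))) (P : PySem.Dict String Int)
    (t : PySem.Dict String Int) : PySem.Dict String Int :=
  S.items.foldl (pvStepB S P) t

def berechne_kosten_alt (name : String) (stueckliste : List (String × List (String × Int))) (preise : List (String × Int)) (cache : Option (List (String × Int))) : Int :=
  let S := PySem.Dict.ofList stueckliste
  let P := PySem.Dict.ofList preise
  let t := (List.range S.size).foldl (fun t _ => pvPass S P t) (pvCache cache)   -- for _ in range(len(stueckliste))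
  match t.get? name with                           -- return table[name] if name in table else preise[name]
  | some v => v
  | none => P.getD name 0

-- ===== PRECONDITION & SPEC =====
-- Helpers for Pre_: a component c is available given the already-resolvable entry keys R
def pvChildOK (S : PySem.Dict String (List (String × Int))) (P C : PySem.Dict String Int)
    (R : List String) (c : String) : Bool :=
  C.contains c || R.contains c || (!(S.contains c) && P.contains c)

-- one step of the monotone closure: the entry keys all of whose components are available
def pvGrow (S : PySem.Dict String (List (String × Int))) (P C : PySem.Dict String Int)
    (R : List String) : List String :=
  S.keys.filter (fun k => ((S.get? k).getD []).all (fun q => pvChildOK S P C R q.1))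

-- the resolvable entry keys: the least fixpoint of pvGrow, reached within S.size steps
def pvRes (S : PySem.Dict String (List (String × Int))) (P C : PySem.Dict String Int) : List String :=
  (pvGrow S P C)^[S.items.length] []

-- Pre_ holds exactly where Python A returns: name is cached, or a priced base part, or an entry
-- whose dependency closure is acyclic with every needed base part priced (= resolvable).
-- Excluded are exactly the inputs where A raises: KeyError (a needed part missing from preise)
-- or RecursionError (a cycle in the parts needed for name).
def Pre_berechne_kosten (name : String) (stueckliste : List (String × List (String × Int))) (preise : List (String × Int)) (cache : Option (List (String × Int))) : Prop :=
  ((pvCache cache).contains name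
    || (!((PySem.Dict.ofList stueckliste).contains name) && (PySem.Dict.ofList preise).contains name)
    || (pvRes (PySem.Dict.ofList stueckliste) (PySem.Dict.ofList preise) (pvCache cache)).contains name) = true
instance (name : String) (stueckliste : List (String × List (String × Int))) (preise : List (String × Int)) (cache : Option (List (String × Int))) : Decidable (Pre_berechne_kosten name stueckliste preise cache) := by unfold Pre_berechne_kosten; infer_instance

def pvWitness_berechne_kosten : String × (List (String × List (String × Int))) × (List (String × Int)) × (Option (List (String × Int))) :=
  ("a", [("a", [("b", 2)])], [("b", 3)], none)

def Spec_berechne_kosten (name : String) (stueckliste : List (String × List (String × Int))) (preise : List (String × Int)) (cache : Option (List (String × Int))) (out : Int) : Prop := out = berechne_kosten_alt name stueckliste preise cache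
instance (name : String) (stueckliste : List (String × List (String × Int))) (preise : List (String × Int)) (cache : Option (List (String × Int))) (out : Int) : Decidable (Spec_berechne_kosten name stueckliste preise cache out) := by unfold Spec_berechne_kosten; infer_instance

-- ===== CLAIM (what is proved, stated in full; the proofs are below) =====
def Claim_equal_berechne_kosten : Prop := ∀ (name : String) (stueckliste : List (String × List (String × Int))) (preise : List (String × Int)) (cache : Option (List (String × Int))), Dom_berechne_kosten name stueckliste preise cache → Pre_berechne_kosten name stueckliste preise cache → Spec_berechne_kosten name stueckliste preise cache (berechne_kosten name stueckliste preise cache)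

-- ===== LEMMAS AND PROOFS =====

-- the i-step closure
def pvRs (S : PySem.Dict String (List (String × Int))) (P C : PySem.Dict String Int) (i : Nat) : List String :=
  (pvGrow S P C)^[i] []

-- the semantic cost function (pure fueled recursion; under pvOK the fuel branch is never hit)
def pvCost (S : PySem.Dict String (List (String × Int))) (P C : PySem.Dict String Int) :
    Nat → String → Int
  | f, x =>
    match C.get? x with
    | some v => v
    | none =>
      match S.get? x with
      | none => P.getD x 0
      | some comp =>
        match f with
        | 0 => 0
        | Nat.succ f' => ((PySem.Dict.ofList comp).items.map (fun q => pvCost S P C f' q.1 * q.2)).sum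

-- x has a defined cost at closure level i
def pvOK (S : PySem.Dict String (List (String × Int))) (P C : PySem.Dict String Int) (i : Nat) (x : String) : Prop :=
  C.contains x = true ∨ S.contains x = false ∨ x ∈ pvRs S P C i

-- invariant of A's running cache
def pvInv (S : PySem.Dict String (List (String × Int))) (P C : PySem.Dict String Int) (c : PySem.Dict String Int) : Prop :=
  (∀ x w, C.get? x = some w → c.get? x = some w) ∧
  (∀ x w, c.get? x = some w → ∃ m, pvOK S P C m x ∧ w = pvCost S P C m x)

-- invariant of B's table
def pvInvB (S : PySem.Dict String (List (String × Int))) (P C : PySem.Dict String Int) (t : PySem.Dict String Int) : Prop :=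
  (∀ x w, C.get? x = some w → t.get? x = some w) ∧
  (∀ x w, t.get? x = some w → C.get? x = some w ∨
    (C.contains x = false ∧ ∃ m, x ∈ pvRs S P C m ∧ w = pvCost S P C m x))

theorem pv_mem_grow (S : PySem.Dict String (List (String × Int))) (P C : PySem.Dict String Int)
    (R : List String) (x : String) :
    x ∈ pvGrow S P C R ↔ x ∈ S.keys ∧ ((S.get? x).getD []).all (fun q => pvChildOK S P C R q.1) = true := by
  simp [pvGrow, List.mem_filter]

theorem pv_childOK_mono (S : PySem.Dict String (List (String × Int))) (P C : PySem.Dict String Int)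
    (R R' : List String) (hsub : ∀ c, c ∈ R → c ∈ R') (c : String)
    (h : pvChildOK S P C R c = true) : pvChildOK S P C R' c = true := by
  unfold pvChildOK at h ⊢
  simp only [Bool.or_eq_true] at h ⊢
  rcases h with (h | h) | h
  · exact Or.inl (Or.inl h)
  · exact Or.inl (Or.inr (List.elem_eq_true_of_mem (hsub _ (List.mem_of_elem_eq_true h))))
  · exact Or.inr h

theorem pv_grow_mono (S : PySem.Dict String (List (String × Int))) (P C : PySem.Dict String Int)
    (R R' : List String) (hsub : ∀ c, c ∈ R → c ∈ R') (x : String)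
    (h : x ∈ pvGrow S P C R) : x ∈ pvGrow S P C R' := by
  rw [pv_mem_grow] at h ⊢
  refine ⟨h.1, ?_⟩
  rw [List.all_eq_true] at *
  intro q hq
  exact pv_childOK_mono S P C R R' hsub _ (h.2 q hq)

theorem pvRs_succ (S : PySem.Dict String (List (String × Int))) (P C : PySem.Dict String Int) (i : Nat) :
    pvRs S P C (i+1) = pvGrow S P C (pvRs S P C i) := by
  exact Function.iterate_succ_apply' (pvGrow S P C) i []

theorem pvRs_mono (S : PySem.Dict String (List (String × Int))) (P C : PySem.Dict String Int)
    (i j : Nat) (hij : i ≤ j) (x : String) (h : x ∈ pvRs S P C i) : x ∈ pvRs S P C j := by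
  have step : ∀ k y, y ∈ pvRs S P C k → y ∈ pvRs S P C (k+1) := by
    intro k
    induction k with
    | zero => intro y hy; exact absurd hy (by simp [pvRs])
    | succ k IH =>
      intro y hy
      rw [pvRs_succ] at hy
      rw [pvRs_succ]
      exact pv_grow_mono S P C _ _ IH y hy
  induction hij with
  | refl => exact h
  | step hle IH => exact step _ x IH

theorem pvRs_subset_keys (S : PySem.Dict String (List (String × Int))) (P C : PySem.Dict String Int)
    (i : Nat) (x : String) (h : x ∈ pvRs S P C i) : x ∈ S.keys := by
  cases i with
  | zero => exact absurd h (by simp [pvRs])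
  | succ i =>
    rw [pvRs_succ] at h
    exact ((pv_mem_grow S P C _ x).mp h).1

theorem pv_mem_keys_ofList (l : List (String × Int)) (k : String) :
    k ∈ (PySem.Dict.ofList l).keys ↔ k ∈ l.map Prod.fst := by
  have hk := PySem.Dict.keys_foldl_insert_key l Prod.fst (fun _ a => a.2) (PySem.Dict.empty : PySem.Dict String Int)
  have h2 : (PySem.Dict.ofList l).keys = PySem.Set.update (PySem.Dict.empty : PySem.Dict String Int).keys (l.map Prod.fst) := hk
  rw [h2]
  exact PySem.List.mem_dedup (l.map Prod.fst) k

theorem pv_childOK_of_grow (S : PySem.Dict String (List (String × Int))) (P C : PySem.Dict String Int)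
    (R : List String) (x : String) (comp : List (String × Int))
    (hx : x ∈ pvGrow S P C R) (hS : S.get? x = some comp) :
    ∀ c ∈ (PySem.Dict.ofList comp).keys, pvChildOK S P C R c = true := by
  intro c hc
  have h2 := ((pv_mem_grow S P C R x).mp hx).2
  rw [hS] at h2
  simp only [Option.getD_some, List.all_eq_true] at h2
  rcases List.mem_map.mp ((pv_mem_keys_ofList comp c).mp hc) with ⟨p, hp, hpc⟩
  have := h2 p hp
  rwa [hpc] at this

theorem pv_childOK_OK (S : PySem.Dict String (List (String × Int))) (P C : PySem.Dict String Int)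
    (i : Nat) (c : String) (h : pvChildOK S P C (pvRs S P C i) c = true) : pvOK S P C i c := by
  unfold pvChildOK at h
  simp only [Bool.or_eq_true, Bool.and_eq_true, Bool.not_eq_true'] at h
  rcases h with (h | h) | ⟨h1, _⟩
  · exact Or.inl h
  · exact Or.inr (Or.inr (List.mem_of_elem_eq_true h))
  · exact Or.inr (Or.inl h1)

theorem pv_cost_cached (S : PySem.Dict String (List (String × Int))) (P C : PySem.Dict String Int)
    (f : Nat) (x : String) (v : Int) (h : C.get? x = some v) : pvCost S P C f x = v := by
  cases f <;> (rw [pvCost]; simp [h])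

theorem pv_cost_base (S : PySem.Dict String (List (String × Int))) (P C : PySem.Dict String Int)
    (f : Nat) (x : String) (hC : C.get? x = none) (hS : S.get? x = none) :
    pvCost S P C f x = P.getD x 0 := by
  cases f <;> (rw [pvCost]; simp [hC, hS])

theorem pv_cost_succ (S : PySem.Dict String (List (String × Int))) (P C : PySem.Dict String Int)
    (f : Nat) (x : String) (comp : List (String × Int))
    (hC : C.get? x = none) (hS : S.get? x = some comp) :
    pvCost S P C (f+1) x = ((PySem.Dict.ofList comp).items.map (fun q => pvCost S P C f q.1 * q.2)).sum := by
  rw [pvCost]; simp [hC, hS]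

-- stability: from level i on, the fueled cost of an OK part no longer changes
theorem pv_cost_stable (S : PySem.Dict String (List (String × Int))) (P C : PySem.Dict String Int) :
    ∀ i x, pvOK S P C i x → ∀ f, i ≤ f → pvCost S P C f x = pvCost S P C i x := by
  intro i
  induction i with
  | zero =>
    intro x hOK f _
    cases hCx : C.get? x with
    | some v => rw [pv_cost_cached S P C f x v hCx, pv_cost_cached S P C 0 x v hCx]
    | none =>
      rcases hOK with hc | hb | hr
      · rw [PySem.Dict.contains_eq_isSome_get?, hCx] at hc
        exact absurd hc (by simp)
      · have hSx : S.get? x = none := (PySem.Dict.get?_eq_none_iff_contains S x).mpr hb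
        rw [pv_cost_base S P C f x hCx hSx, pv_cost_base S P C 0 x hCx hSx]
      · exact absurd hr (by simp [pvRs])
  | succ i IH =>
    intro x hOK f hf
    cases hCx : C.get? x with
    | some v => rw [pv_cost_cached S P C f x v hCx, pv_cost_cached S P C (i+1) x v hCx]
    | none =>
      rcases hOK with hc | hb | hr
      · rw [PySem.Dict.contains_eq_isSome_get?, hCx] at hc
        exact absurd hc (by simp)
      · have hSx : S.get? x = none := (PySem.Dict.get?_eq_none_iff_contains S x).mpr hb
        rw [pv_cost_base S P C f x hCx hSx, pv_cost_base S P C (i+1) x hCx hSx]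
      · have hco : S.contains x = true := (PySem.Dict.contains_iff_mem_keys S x).mpr (pvRs_subset_keys S P C (i+1) x hr)
        have hso : (S.get? x).isSome := by rw [← PySem.Dict.contains_eq_isSome_get?, hco]
        rcases Option.isSome_iff_exists.mp hso with ⟨comp, hcomp⟩
        cases f with
        | zero => omega
        | succ f' =>
          rw [pv_cost_succ S P C f' x comp hCx hcomp, pv_cost_succ S P C i x comp hCx hcomp]
          congr 1
          apply List.map_congr_left
          intro q hq
          rw [pvRs_succ] at hr
          have hcOK : pvOK S P C i q.1 :=
            pv_childOK_OK S P C i q.1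
              (pv_childOK_of_grow S P C _ x comp hr hcomp q.1 (PySem.Dict.mem_keys_of_mem_items _ hq))
          rw [IH q.1 hcOK f' (by omega)]

theorem pv_cost_agree (S : PySem.Dict String (List (String × Int))) (P C : PySem.Dict String Int)
    (i j : Nat) (x : String) (hi : pvOK S P C i x) (hj : pvOK S P C j x) :
    pvCost S P C i x = pvCost S P C j x := by
  have h1 := pv_cost_stable S P C i x hi (max i j) (le_max_left i j)
  have h2 := pv_cost_stable S P C j x hj (max i j) (le_max_right i j)
  rw [← h1, ← h2]

theorem pvGoA_succ (S : PySem.Dict String (List (String × Int))) (P : PySem.Dict String Int)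
    (fuel : Nat) (name : String) (c : PySem.Dict String Int) :
    pvGoA S P (fuel+1) name c =
      match c.get? name with
      | some v => (v, c)
      | none =>
        match S.get? name with
        | none => (P.getD name 0, c.insert name (P.getD name 0))
        | some comp =>
          let r := (PySem.Dict.ofList comp).items.foldl
            (fun (acc : Int × PySem.Dict String Int) q =>
              let t := pvGoA S P fuel q.1 acc.2
              (acc.1 + t.1 * q.2, t.2)) (0, c)
          (r.1, r.2.insert name r.1) := rfl

-- A's recursion computes pvCost and preserves the cache invariant
theorem pvGoA_main (S : PySem.Dict String (List (String × Int))) (P C : PySem.Dict String Int) :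
    ∀ i x, pvOK S P C i x → ∀ fuel, i + 1 ≤ fuel → ∀ c, pvInv S P C c →
      (pvGoA S P fuel x c).1 = pvCost S P C i x ∧ pvInv S P C (pvGoA S P fuel x c).2 := by
  intro i
  induction i using Nat.strong_induction_on with
  | _ i IH =>
  intro x hOK fuel hf c hinv
  obtain ⟨hinv1, hinv2⟩ := hinv
  cases fuel with
  | zero => omega
  | succ f =>
  cases hc : c.get? x with
  | some v =>
    rw [pvGoA_succ, hc]
    obtain ⟨m, hOKm, hw⟩ := hinv2 x v hc
    exact ⟨by rw [hw]; exact pv_cost_agree S P C m i x hOKm hOK, hinv1, hinv2⟩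
  | none =>
    have hCx : C.get? x = none := by
      cases hCc : C.get? x with
      | none => rfl
      | some w => rw [hinv1 x w hCc] at hc; cases hc
    cases hs : S.get? x with
    | none =>
      rw [pvGoA_succ, hc, hs]
      refine ⟨(pv_cost_base S P C i x hCx hs).symm, ?_, ?_⟩
      · intro y w hy
        have hyx : y ≠ x := by intro e; subst e; rw [hy] at hCx; cases hCx
        rw [PySem.Dict.get?_insert_of_ne _ _ hyx]
        exact hinv1 y w hy
      · intro y w hy
        by_cases hyx : y = x
        · subst hyx
          rw [PySem.Dict.get?_insert_self] at hy
          cases hy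
          exact ⟨0, Or.inr (Or.inl ((PySem.Dict.get?_eq_none_iff_contains S y).mp hs)), (pv_cost_base S P C 0 y hCx hs).symm⟩
        · rw [PySem.Dict.get?_insert_of_ne _ _ hyx] at hy
          exact hinv2 y w hy
    | some comp =>
      have hSc : S.contains x = true := by rw [PySem.Dict.contains_eq_isSome_get?, hs]; rfl
      have hCco : C.contains x = false := by rw [PySem.Dict.contains_eq_isSome_get?, hCx]; rfl
      have hr : x ∈ pvRs S P C i := by
        rcases hOK with h | h | h
        · rw [hCco] at h; cases h
        · rw [hSc] at h; cases h
        · exact h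
      cases i with
      | zero => exact absurd hr (by simp [pvRs])
      | succ i' =>
      rw [pvRs_succ] at hr
      have hchild := pv_childOK_of_grow S P C _ x comp hr hs
      have hfold : ∀ (L : List (String × Int)), (∀ q ∈ L, pvOK S P C i' q.1) →
          ∀ (acc : Int) (c' : PySem.Dict String Int), pvInv S P C c' →
          (L.foldl (fun (acc : Int × PySem.Dict String Int) q =>
            let t := pvGoA S P f q.1 acc.2
            (acc.1 + t.1 * q.2, t.2)) (acc, c')).1
              = acc + (L.map (fun q => pvCost S P C i' q.1 * q.2)).sum
          ∧ pvInv S P C (L.foldl (fun (acc : Int × PySem.Dict String Int) q =>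
            let t := pvGoA S P f q.1 acc.2
            (acc.1 + t.1 * q.2, t.2)) (acc, c')).2 := by
        intro L
        induction L with
        | nil => intro _ acc c' h; simpa using h
        | cons q L IHL =>
          intro hOKs acc c' hinv'
          have hrec := IH i' (by omega) q.1 (hOKs q (by simp)) f (by omega) c' hinv'
          have hstep : (List.foldl (fun (acc : Int × PySem.Dict String Int) q =>
                let t := pvGoA S P f q.1 acc.2
                (acc.1 + t.1 * q.2, t.2)) (acc, c') (q :: L))
              = List.foldl (fun (acc : Int × PySem.Dict String Int) q =>
                let t := pvGoA S P f q.1 acc.2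
                (acc.1 + t.1 * q.2, t.2)) (acc + (pvGoA S P f q.1 c').1 * q.2, (pvGoA S P f q.1 c').2) L := rfl
          rw [hstep, hrec.1]
          have hrest := IHL (fun p hp => hOKs p (by simp [hp])) (acc + pvCost S P C i' q.1 * q.2)
            ((pvGoA S P f q.1 c').2) hrec.2
          refine ⟨?_, hrest.2⟩
          rw [hrest.1]
          simp [add_assoc]
      have hOKs : ∀ q ∈ (PySem.Dict.ofList comp).items, pvOK S P C i' q.1 := by
        intro q hq
        exact pv_childOK_OK S P C i' q.1 (hchild q.1 (PySem.Dict.mem_keys_of_mem_items _ hq))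
      have hrr := hfold (PySem.Dict.ofList comp).items hOKs 0 c ⟨hinv1, hinv2⟩
      rw [pvGoA_succ, hc, hs]
      have hcost : pvCost S P C (i'+1) x
          = ((PySem.Dict.ofList comp).items.map (fun q => pvCost S P C i' q.1 * q.2)).sum :=
        pv_cost_succ S P C i' x comp hCx hs
      have hval : ((PySem.Dict.ofList comp).items.foldl (fun (acc : Int × PySem.Dict String Int) q =>
            let t := pvGoA S P f q.1 acc.2
            (acc.1 + t.1 * q.2, t.2)) (0, c)).1 = pvCost S P C (i'+1) x := by
        rw [hrr.1, hcost]; simp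
      refine ⟨hval, ?_, ?_⟩
      · intro y w hy
        have hyx : y ≠ x := by intro e; subst e; rw [hy] at hCx; cases hCx
        rw [PySem.Dict.get?_insert_of_ne _ _ hyx]
        exact hrr.2.1 y w hy
      · intro y w hy
        by_cases hyx : y = x
        · subst hyx
          rw [PySem.Dict.get?_insert_self] at hy
          cases hy
          exact ⟨i'+1, Or.inr (Or.inr (by rw [pvRs_succ]; exact hr)), hval⟩
        · rw [PySem.Dict.get?_insert_of_ne _ _ hyx] at hy
          exact hrr.2.2 y w hy

-- B: one step preserves existing entries
theorem pvStepB_mono (S : PySem.Dict String (List (String × Int))) (P : PySem.Dict String Int)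
    (t : PySem.Dict String Int) (p : String × List (String × Int)) (x : String) (v : Int)
    (h : t.get? x = some v) : (pvStepB S P t p).get? x = some v := by
  unfold pvStepB
  split
  · next hcond =>
    have hx : x ≠ p.1 := by
      intro e
      subst e
      simp only [Bool.and_eq_true, Bool.not_eq_true'] at hcond
      rw [PySem.Dict.contains_eq_isSome_get?, h] at hcond
      simp at hcond
    rw [PySem.Dict.get?_insert_of_ne _ _ hx]
    exact h
  · exact h

theorem pvStepB_contains_mono (S : PySem.Dict String (List (String × Int))) (P : PySem.Dict String Int)
    (t : PySem.Dict String Int) (p : String × List (String × Int)) (x : String)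
    (h : t.contains x = true) : (pvStepB S P t p).contains x = true := by
  rw [PySem.Dict.contains_eq_isSome_get?] at h
  rcases Option.isSome_iff_exists.mp h with ⟨v, hv⟩
  rw [PySem.Dict.contains_eq_isSome_get?, pvStepB_mono S P t p x v hv]
  rfl

-- the value B reads for a component: table[c] if c in table else preise[c]
def pvRef (P t : PySem.Dict String Int) (c : String) : Int :=
  match t.get? c with
  | some v => v
  | none => P.getD c 0

theorem pv_ref_good (S : PySem.Dict String (List (String × Int))) (P C : PySem.Dict String Int)
    (t : PySem.Dict String Int) (hinv : pvInvB S P C t) (c : String)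
    (hg : (t.contains c || (!(S.contains c) && P.contains c)) = true) :
    ∃ m, pvChildOK S P C (pvRs S P C m) c = true ∧ pvOK S P C m c ∧ pvRef P t c = pvCost S P C m c := by
  obtain ⟨hi1, hi2⟩ := hinv
  by_cases htc : t.contains c = true
  · rw [PySem.Dict.contains_eq_isSome_get?] at htc
    rcases Option.isSome_iff_exists.mp htc with ⟨w, hw⟩
    have href : pvRef P t c = w := by unfold pvRef; rw [hw]
    rcases hi2 c w hw with hCc | ⟨_, m, hm, hwv⟩
    · have hcc : C.contains c = true := by rw [PySem.Dict.contains_eq_isSome_get?, hCc]; rfl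
      exact ⟨0, by unfold pvChildOK; simp [hcc], Or.inl hcc,
        href.trans (pv_cost_cached S P C 0 c w hCc).symm⟩
    · refine ⟨m, ?_, Or.inr (Or.inr hm), by rw [href, hwv]⟩
      unfold pvChildOK
      simp only [Bool.or_eq_true]
      exact Or.inl (Or.inr (List.elem_eq_true_of_mem hm))
  · have htf : t.contains c = false := by simpa using htc
    have hg' : (!(S.contains c) && P.contains c) = true := by
      rcases Bool.or_eq_true_iff.mp hg with h | h
      · exact absurd h htc
      · exact h
    have htn : t.get? c = none := (PySem.Dict.get?_eq_none_iff_contains t c).mpr htf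
    have hCn : C.get? c = none := by
      cases hC : C.get? c with
      | none => rfl
      | some w => rw [hi1 c w hC] at htn; cases htn
    simp only [Bool.and_eq_true, Bool.not_eq_true'] at hg'
    obtain ⟨hS, hP⟩ := hg'
    have hSn : S.get? c = none := (PySem.Dict.get?_eq_none_iff_contains S c).mpr hS
    refine ⟨0, ?_, Or.inr (Or.inl hS), ?_⟩
    · unfold pvChildOK; simp [hS, hP]
    · unfold pvRef; rw [htn]
      exact (pv_cost_base S P C 0 c hCn hSn).symm

theorem pv_uniform (S : PySem.Dict String (List (String × Int))) (P C : PySem.Dict String Int)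
    (t : PySem.Dict String Int) (K : List String)
    (h : ∀ c ∈ K, ∃ m, pvChildOK S P C (pvRs S P C m) c = true ∧ pvOK S P C m c ∧ pvRef P t c = pvCost S P C m c) :
    ∃ f, ∀ c ∈ K, pvChildOK S P C (pvRs S P C f) c = true ∧ pvRef P t c = pvCost S P C f c := by
  induction K with
  | nil => exact ⟨0, by simp⟩
  | cons c K IHK =>
    obtain ⟨m, hcm, hOKm, hvm⟩ := h c (by simp)
    obtain ⟨fL, hfL⟩ := IHK (fun d hd => h d (by simp [hd]))
    refine ⟨max m fL, ?_⟩
    intro d hd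
    rcases List.mem_cons.mp hd with rfl | hd'
    · refine ⟨pv_childOK_mono S P C _ _ (fun y hy => pvRs_mono S P C m _ (le_max_left m fL) y hy) d hcm, ?_⟩
      rw [hvm]
      exact (pv_cost_stable S P C m d hOKm (max m fL) (le_max_left m fL)).symm
    · obtain ⟨hcd, hvd⟩ := hfL d hd'
      refine ⟨pv_childOK_mono S P C _ _ (fun y hy => pvRs_mono S P C fL _ (le_max_right m fL) y hy) d hcd, ?_⟩
      rw [hvd]
      exact (pv_cost_stable S P C fL d (pv_childOK_OK S P C fL d hcd) (max m fL) (le_max_right m fL)).symm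

theorem pvStepB_inv (S : PySem.Dict String (List (String × Int))) (P C : PySem.Dict String Int)
    (hnd : S.keys.Nodup) (t : PySem.Dict String Int) (h : pvInvB S P C t)
    (p : String × List (String × Int)) (hp : p ∈ S.items) :
    pvInvB S P C (pvStepB S P t p) := by
  unfold pvStepB
  split
  · next hcond =>
    simp only [Bool.and_eq_true, Bool.not_eq_true'] at hcond
    obtain ⟨hnp, hall⟩ := hcond
    rw [List.all_eq_true] at hall
    have hpe : (p.1, p.2) ∈ S.items := by simpa using hp
    have hSp : S.get? p.1 = some p.2 := PySem.Dict.get?_of_mem_items S hpe hnd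
    have htn : t.get? p.1 = none := (PySem.Dict.get?_eq_none_iff_contains t p.1).mpr hnp
    have hCn : C.get? p.1 = none := by
      cases hC : C.get? p.1 with
      | none => rfl
      | some w => rw [h.1 p.1 w hC] at htn; cases htn
    have hCc : C.contains p.1 = false := by rw [PySem.Dict.contains_eq_isSome_get?, hCn]; rfl
    obtain ⟨f, hf⟩ := pv_uniform S P C t (PySem.Dict.ofList p.2).keys
      (fun c hc => pv_ref_good S P C t h c (hall c hc))
    have hveq : ((PySem.Dict.ofList p.2).items.map
          (fun q => (match t.get? q.1 with | some v => v | none => P.getD q.1 0) * q.2)).sum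
        = ((PySem.Dict.ofList p.2).items.map (fun q => pvCost S P C f q.1 * q.2)).sum := by
      congr 1
      apply List.map_congr_left
      intro q hq
      have := (hf q.1 (PySem.Dict.mem_keys_of_mem_items _ hq)).2
      unfold pvRef at this
      rw [this]
    have hmem : p.1 ∈ pvRs S P C (f+1) := by
      rw [pvRs_succ, pv_mem_grow, hSp]
      refine ⟨PySem.Dict.mem_keys_of_mem_items S hp, ?_⟩
      simp only [Option.getD_some, List.all_eq_true]
      intro q hq
      exact (hf q.1 ((pv_mem_keys_ofList p.2 q.1).mpr (List.mem_map.mpr ⟨q, hq, rfl⟩))).1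
    have hcost : pvCost S P C (f+1) p.1
        = ((PySem.Dict.ofList p.2).items.map (fun q => pvCost S P C f q.1 * q.2)).sum :=
      pv_cost_succ S P C f p.1 p.2 hCn hSp
    constructor
    · intro y w hy
      have hyx : y ≠ p.1 := by intro e; subst e; rw [hy] at hCn; cases hCn
      rw [PySem.Dict.get?_insert_of_ne _ _ hyx]
      exact h.1 y w hy
    · intro y w hy
      by_cases hyx : y = p.1
      · subst hyx
        rw [PySem.Dict.get?_insert_self] at hy
        cases hy
        exact Or.inr ⟨hCc, f+1, hmem, hveq.trans hcost.symm⟩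
      · rw [PySem.Dict.get?_insert_of_ne _ _ hyx] at hy
        exact h.2 y w hy
  · exact h

-- B: a sweep preserves the invariant
theorem pv_foldl_inv (S : PySem.Dict String (List (String × Int))) (P C : PySem.Dict String Int)
    (hnd : S.keys.Nodup) :
    ∀ (L : List (String × List (String × Int))), (∀ p ∈ L, p ∈ S.items) →
      ∀ t, pvInvB S P C t → pvInvB S P C (L.foldl (pvStepB S P) t) := by
  intro L
  induction L with
  | nil => intro _ t h; exact h
  | cons p L IHL =>
    intro hsub t h
    exact IHL (fun q hq => hsub q (List.mem_cons_of_mem p hq)) (pvStepB S P t p)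
      (pvStepB_inv S P C hnd t h p (hsub p List.mem_cons_self))

theorem pvPass_inv (S : PySem.Dict String (List (String × Int))) (P C : PySem.Dict String Int)
    (hnd : S.keys.Nodup) (t : PySem.Dict String Int) (h : pvInvB S P C t) :
    pvInvB S P C (pvPass S P t) :=
  pv_foldl_inv S P C hnd S.items (fun _ hp => hp) t h

theorem pv_foldl_contains_mono (S : PySem.Dict String (List (String × Int))) (P : PySem.Dict String Int) :
    ∀ (L : List (String × List (String × Int))) (t : PySem.Dict String Int) (x : String),
      t.contains x = true → (L.foldl (pvStepB S P) t).contains x = true := by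
  intro L
  induction L with
  | nil => intro t x h; exact h
  | cons p L IHL =>
    intro t x h
    exact IHL (pvStepB S P t p) x (pvStepB_contains_mono S P t p x h)

theorem pv_foldl_contains_of (S : PySem.Dict String (List (String × Int))) (P : PySem.Dict String Int) :
    ∀ (L : List (String × List (String × Int))) (t : PySem.Dict String Int) (k : String) (comp : List (String × Int)),
      (k, comp) ∈ L →
      (∀ c ∈ (PySem.Dict.ofList comp).keys, (t.contains c || (!(S.contains c) && P.contains c)) = true) →
      (L.foldl (pvStepB S P) t).contains k = true := by
  intro L
  induction L with
  | nil => intro t k comp h; exact absurd h (by simp)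
  | cons p L IHL =>
    intro t k comp hmem hch
    rcases List.mem_cons.mp hmem with hpk | hmem'
    · have hstep : (pvStepB S P t (k, comp)).contains k = true := by
        by_cases htk : t.contains k = true
        · exact pvStepB_contains_mono S P t (k, comp) k htk
        · have hcond : (!t.contains k && (PySem.Dict.ofList comp).keys.all
              (fun c => t.contains c || (!(S.contains c) && P.contains c))) = true := by
            simp only [Bool.and_eq_true, Bool.not_eq_true']
            exact ⟨by simpa using htk, List.all_eq_true.mpr hch⟩
          unfold pvStepB
          split
          · next => exact PySem.Dict.contains_insert_self _ _ _
          · next hcnd => exact absurd hcond hcnd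
      rw [← hpk]
      exact pv_foldl_contains_mono S P L (pvStepB S P t (k, comp)) k hstep
    · refine IHL (pvStepB S P t p) k comp hmem' ?_
      intro c hc
      rcases Bool.or_eq_true_iff.mp (hch c hc) with h1 | h1
      · rw [pvStepB_contains_mono S P t p c h1]
        rfl
      · rw [h1]
        simp
-- B: a sweep adds every entry of the next closure level
theorem pvPass_complete (S : PySem.Dict String (List (String × Int))) (P C : PySem.Dict String Int)
    (hnd : S.keys.Nodup) (j : Nat) (t : PySem.Dict String Int)
    (hC : ∀ x w, C.get? x = some w → t.get? x = some w)
    (h : ∀ x, x ∈ pvRs S P C j → t.contains x = true) :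
    ∀ x, x ∈ pvRs S P C (j+1) → (pvPass S P t).contains x = true := by
  intro x hx
  rw [pvRs_succ] at hx
  have hxk : x ∈ S.keys := ((pv_mem_grow S P C _ x).mp hx).1
  have hxm : x ∈ S.items.map Prod.fst := by
    simpa [PySem.Dict.keys] using hxk
  obtain ⟨p, hp, rfl⟩ := List.mem_map.mp hxm
  have hpe : (p.1, p.2) ∈ S.items := by simpa using hp
  have hSp : S.get? p.1 = some p.2 := PySem.Dict.get?_of_mem_items S hpe hnd
  have hchild := pv_childOK_of_grow S P C _ p.1 p.2 hx hSp
  refine pv_foldl_contains_of S P S.items t p.1 p.2 hpe ?_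
  intro c hc
  have hck := hchild c hc
  unfold pvChildOK at hck
  rcases Bool.or_eq_true_iff.mp hck with h1 | h1
  · rcases Bool.or_eq_true_iff.mp h1 with h2 | h2
    · -- cached
      have hsome : (C.get? c).isSome = true := by
        rw [← PySem.Dict.contains_eq_isSome_get?]; exact h2
      rcases Option.isSome_iff_exists.mp hsome with ⟨w, hw⟩
      rw [PySem.Dict.contains_eq_isSome_get?, hC c w hw]
      rfl
    · -- in pvRs j
      rw [h c (List.mem_of_elem_eq_true h2)]
      rfl
  · rw [h1]
    simp

-- B's sweep loop: after n sweeps the table satisfies the invariant and contains level n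
theorem pv_iter_props (S : PySem.Dict String (List (String × Int))) (P C : PySem.Dict String Int)
    (hnd : S.keys.Nodup) : ∀ n : Nat,
    pvInvB S P C ((List.range n).foldl (fun t _ => pvPass S P t) C) ∧
    (∀ x, x ∈ pvRs S P C n → ((List.range n).foldl (fun t _ => pvPass S P t) C).contains x = true) := by
  intro n
  induction n with
  | zero =>
    exact ⟨⟨fun _ _ h => h, fun _ _ h => Or.inl h⟩, fun x hx => absurd hx (by simp [pvRs])⟩
  | succ n IH =>
    have hstep : (List.range (n+1)).foldl (fun t _ => pvPass S P t) C
        = pvPass S P ((List.range n).foldl (fun t _ => pvPass S P t) C) := by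
      rw [List.range_succ, List.foldl_append]
      rfl
    rw [hstep]
    exact ⟨pvPass_inv S P C hnd _ IH.1, pvPass_complete S P C hnd n _ IH.1.1 IH.2⟩

-- ===== VERDICT (by name: the statement is the Claim_ definition above) =====
theorem berechne_kosten_spec : Claim_equal_berechne_kosten := by
  intro name st pr cache _ hpre
  unfold Spec_berechne_kosten
  unfold Pre_berechne_kosten at hpre
  have hnd : (PySem.Dict.ofList st).keys.Nodup := PySem.Dict.nodup_keys_ofList st
  have hT := pv_iter_props (PySem.Dict.ofList st) (PySem.Dict.ofList pr) (pvCache cache) hnd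
    (PySem.Dict.ofList st).size
  have hInvC : pvInv (PySem.Dict.ofList st) (PySem.Dict.ofList pr) (pvCache cache) (pvCache cache) :=
    ⟨fun _ _ h => h, fun x w h =>
      ⟨0, Or.inl (by rw [PySem.Dict.contains_eq_isSome_get?, h]; rfl),
        (pv_cost_cached (PySem.Dict.ofList st) (PySem.Dict.ofList pr) (pvCache cache) 0 x w h).symm⟩⟩
  show (pvGoA (PySem.Dict.ofList st) (PySem.Dict.ofList pr) ((PySem.Dict.ofList st).size + 1) name (pvCache cache)).1
      = berechne_kosten_alt name st pr cache
  have hBdef : berechne_kosten_alt name st pr cache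
      = (match ((List.range (PySem.Dict.ofList st).size).foldl
            (fun t _ => pvPass (PySem.Dict.ofList st) (PySem.Dict.ofList pr) t) (pvCache cache)).get? name with
         | some v => v
         | none => (PySem.Dict.ofList pr).getD name 0) := rfl
  cases hCn : (pvCache cache).get? name with
  | some w =>
    have hA : (pvGoA (PySem.Dict.ofList st) (PySem.Dict.ofList pr) ((PySem.Dict.ofList st).size + 1) name (pvCache cache)).1 = w := by
      rw [pvGoA_succ, hCn]
    have hBT := hT.1.1 name w hCn
    rw [hA, hBdef, hBT]
  | none =>
    rcases Bool.or_eq_true_iff.mp hpre with h1 | hres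
    · rcases Bool.or_eq_true_iff.mp h1 with hcache | hbase
      · rw [PySem.Dict.contains_eq_isSome_get?, hCn] at hcache
        exact absurd hcache (by simp)
      · simp only [Bool.and_eq_true, Bool.not_eq_true'] at hbase
        obtain ⟨hS, _⟩ := hbase
        have hSn : (PySem.Dict.ofList st).get? name = none :=
          (PySem.Dict.get?_eq_none_iff_contains (PySem.Dict.ofList st) name).mpr hS
        have hA : (pvGoA (PySem.Dict.ofList st) (PySem.Dict.ofList pr) ((PySem.Dict.ofList st).size + 1) name (pvCache cache)).1
            = (PySem.Dict.ofList pr).getD name 0 := by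
          rw [pvGoA_succ, hCn, hSn]
        have hBT : ((List.range (PySem.Dict.ofList st).size).foldl
            (fun t _ => pvPass (PySem.Dict.ofList st) (PySem.Dict.ofList pr) t) (pvCache cache)).get? name = none := by
          cases hTg : ((List.range (PySem.Dict.ofList st).size).foldl
              (fun t _ => pvPass (PySem.Dict.ofList st) (PySem.Dict.ofList pr) t) (pvCache cache)).get? name with
          | none => rfl
          | some w =>
            rcases hT.1.2 name w hTg with hc | ⟨_, m, hm, _⟩
            · rw [hc] at hCn; cases hCn
            · have hk := pvRs_subset_keys (PySem.Dict.ofList st) (PySem.Dict.ofList pr) (pvCache cache) m name hm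
              rw [(PySem.Dict.contains_iff_mem_keys (PySem.Dict.ofList st) name).mpr hk] at hS
              cases hS
        rw [hA, hBdef, hBT]
    · have hmem : name ∈ pvRs (PySem.Dict.ofList st) (PySem.Dict.ofList pr) (pvCache cache) (PySem.Dict.ofList st).size :=
        List.mem_of_elem_eq_true hres
      have hOKn : pvOK (PySem.Dict.ofList st) (PySem.Dict.ofList pr) (pvCache cache) (PySem.Dict.ofList st).size name :=
        Or.inr (Or.inr hmem)
      have hA := (pvGoA_main (PySem.Dict.ofList st) (PySem.Dict.ofList pr) (pvCache cache)
        (PySem.Dict.ofList st).size name hOKn ((PySem.Dict.ofList st).size + 1) (by omega) (pvCache cache) hInvC).1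
      have hco := hT.2 name hmem
      rw [PySem.Dict.contains_eq_isSome_get?] at hco
      rcases Option.isSome_iff_exists.mp hco with ⟨w, hTg⟩
      rcases hT.1.2 name w hTg with hc | ⟨_, m, hm, hw⟩
      · rw [hc] at hCn; cases hCn
      · have hwN : w = pvCost (PySem.Dict.ofList st) (PySem.Dict.ofList pr) (pvCache cache) (PySem.Dict.ofList st).size name := by
          rw [hw]
          exact pv_cost_agree (PySem.Dict.ofList st) (PySem.Dict.ofList pr) (pvCache cache) m
            (PySem.Dict.ofList st).size name (Or.inr (Or.inr hm)) hOKn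
        rw [hA, hBdef, hTg, hwN]
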